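-- pv_equiv track=rewrite | github.com/alexalvis/IncentiveFollower | experiement.py | count_delivers
-- ===== SOURCE A (Python) =====
-- def count_delivers(traj):
--     warm_delivers = 0
--     cold_delivers = 0
--
--     for i in range(0, len(traj), 2):
--         if i >= 2:
--             old_stove_state, old_counter_state = traj[i - 2]
--             new_stove_state, new_counter_state = traj[i]
--
--             warm_delivers += sum([1 for i, _ in enumerate(new_counter_state)
--                                   if (old_counter_state[i] == "warm") and new_counter_state[i] == "empty"])
--             cold_delivers += sum([1 for i, _ in enumerate(new_counter_state)
--                                   if (old_counter_state[i] == "cold") and new_counter_state[i] == "empty"])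
--
--     return warm_delivers, cold_delivers
-- ===== SOURCE B (Python) =====
-- def count_delivers(traj):
--     # column-major: walk each counter position's timeline of even-index snapshots
--     snaps = [counter for _, counter in traj[::2]]
--     warm = 0
--     cold = 0
--     for j in range(max(map(len, snaps), default=0)):
--         col = [s[j] for s in snaps if j < len(s)]
--         for prev, cur in zip(col, col[1:]):
--             if cur == "empty":
--                 if prev == "warm":
--                     warm += 1
--                 elif prev == "cold":
--                     cold += 1
--     return warm, cold
-- ===== Notes on version B (the rewrite author's own statement) =====
-- stated objective: alternative
-- what changed: A walks the trajectory row-major, scanning each new counter state twice with index lookups per transition; B transposes the problem: it collects the even-index counter snapshots and, for each counter position (column), walks that position's timeline once, counting warm->empty and cold->empty steps between adjacent snapshots.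
import Mathlib
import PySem

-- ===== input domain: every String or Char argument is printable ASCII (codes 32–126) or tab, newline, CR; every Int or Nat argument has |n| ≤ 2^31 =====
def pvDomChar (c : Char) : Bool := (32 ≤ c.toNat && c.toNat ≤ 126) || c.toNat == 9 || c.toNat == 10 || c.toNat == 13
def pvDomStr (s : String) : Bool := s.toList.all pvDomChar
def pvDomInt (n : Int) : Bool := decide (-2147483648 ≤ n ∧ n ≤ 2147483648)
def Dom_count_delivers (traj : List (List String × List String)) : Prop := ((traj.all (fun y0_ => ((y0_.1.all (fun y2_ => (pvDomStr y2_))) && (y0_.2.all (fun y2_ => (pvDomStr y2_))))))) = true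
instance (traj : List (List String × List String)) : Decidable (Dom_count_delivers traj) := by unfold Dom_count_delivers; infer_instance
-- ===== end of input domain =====

-- B replaces A's row-major index loop with twin comprehension scans by a column-major traversal:
-- it collects the even-index counter snapshots and walks each counter position's timeline once,
-- counting warm->empty and cold->empty adjacent steps (objective: alternative).


-- ===== PORT A =====
-- sum([1 for i, _ in enumerate(new_counter_state) if old_counter_state[i] == t and new_counter_state[i] == "empty"])
def countDeliversSum (old new : List String) (t : String) : Int :=
  (((PySem.List.enumerate new).filter
      (fun p => (PySem.List.pyGetD old p.1 "" == t) && (PySem.List.pyGetD new p.1 "" == "empty"))).map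
    (fun _ => (1 : Int))).sum

def count_delivers (traj : List (List String × List String)) : Int × Int :=
  (PySem.List.pyRange 0 (traj.length) 2).foldl
    (fun wc i =>
      if 2 ≤ i then
        let oldp := PySem.List.pyGetD traj (i - 2) ([], [])
        let newp := PySem.List.pyGetD traj i ([], [])
        (wc.1 + countDeliversSum oldp.2 newp.2 "warm",
         wc.2 + countDeliversSum oldp.2 newp.2 "cold")
      else wc)
    (0, 0)

-- ===== PORT B =====
-- if cur == "empty": if prev == "warm": warm += 1 elif prev == "cold": cold += 1
def cdStep (wc : Int × Int) (pc : String × String) : Int × Int :=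
  if pc.2 == "empty" then
    if pc.1 == "warm" then (wc.1 + 1, wc.2)
    else if pc.1 == "cold" then (wc.1, wc.2 + 1)
    else wc
  else wc

def count_delivers_alt (traj : List (List String × List String)) : Int × Int :=
  let snaps := ((PySem.List.slice? traj none none 2).getD []).map (fun p => p.2)
  let width := (snaps.map List.length).foldl max 0
  (List.range width).foldl
    (fun wc j =>
      let col := (snaps.filter (fun s => decide (j < s.length))).map (fun s => s.getD j "")
      (col.zip (col.drop 1)).foldl cdStep wc)
    (0, 0)

-- ===== PRECONDITION & SPEC =====
-- Pre_ excludes exactly the inputs where A raises IndexError: a stride-2 transition whose new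
-- counter state is longer than the old one (the comprehension indexes the old state by the new state's indices).
def Pre_count_delivers (traj : List (List String × List String)) : Prop :=
  ∀ k : Nat, k < traj.length → 2 * k + 2 < traj.length →
    ((traj.getD (2 * k + 2) ([], [])).2).length ≤ ((traj.getD (2 * k) ([], [])).2).length
instance (traj : List (List String × List String)) : Decidable (Pre_count_delivers traj) := by unfold Pre_count_delivers; infer_instance

def pvWitness_count_delivers : (List (List String × List String)) :=
  [(["on"], ["warm"]), ([], []), (["off"], ["empty"])]

def Spec_count_delivers (traj : List (List String × List String)) (out : Int × Int) : Prop := out = count_delivers_alt traj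
instance (traj : List (List String × List String)) (out : Int × Int) : Decidable (Spec_count_delivers traj out) := by unfold Spec_count_delivers; infer_instance

-- ===== CLAIM (what is proved, stated in full; the proofs are below) =====
def Claim_equal_count_delivers : Prop := ∀ (traj : List (List String × List String)), Dom_count_delivers traj → Pre_count_delivers traj → Spec_count_delivers traj (count_delivers traj)

-- ===== LEMMAS AND PROOFS =====

-- delivery predicate on an (old, new) position pair, and the per-transition count
def wpred (t : String) : String × String → Bool := fun p => p.1 == t && p.2 == "empty"
def pairCnt (t : String) (old new : List String) : Int := ((old.zip new).countP (wpred t) : Int)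
-- B's column at position j, and its per-column count
def cdCol (snaps : List (List String)) (j : Nat) : List String :=
  (snaps.filter (fun s => decide (j < s.length))).map (fun s => s.getD j "")
def colCnt (t : String) (snaps : List (List String)) (j : Nat) : Int :=
  ((((cdCol snaps j).zip ((cdCol snaps j).drop 1)).countP (wpred t) : Nat) : Int)

theorem sliceEven0 {α : Type} (xs : List α) (d : α) :
    PySem.List.slice? xs (some 0) none 2 = some ((List.range ((xs.length+1)/2)).map (fun k => xs.getD (2*k) d)) := by
  simp only [PySem.List.slice?, PySem.List.sliceIndices]
  norm_num
  have hm : (if 0 < xs.length then (((xs.length:Int) + 2 - 1) / 2).toNat else 0) = (xs.length + 1)/2 := by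
    split <;> omega
  rw [hm, List.filterMap_congr (g := fun k => some (xs.getD (2*k) d)) ?_]
  · simp [List.getD]
  intro k hk
  rw [List.mem_range] at hk
  have h2 : (2 * (k:Int)).toNat = 2*k := by omega
  have hlt : 2*k < xs.length := by omega
  simp [h2, List.getElem?_eq_getElem hlt, List.getD_eq_getElem?_getD]

theorem sliceEvenNone {α : Type} (xs : List α) (d : α) :
    PySem.List.slice? xs none none 2 = some ((List.range ((xs.length+1)/2)).map (fun k => xs.getD (2*k) d)) := by
  rw [← sliceEven0 xs d]
  simp only [PySem.List.slice?, PySem.List.sliceIndices]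
  norm_num

-- A's comprehension count equals the zip count, provided old is long enough
theorem enumCount (t : String) : ∀ (new old pre : List String), new.length ≤ old.length →
    (((PySem.List.enumerate new ((pre.length : Int))).filter
        (fun p => (PySem.List.pyGetD (pre ++ old) p.1 "" == t) && (p.2 == "empty"))).length : Int)
      = pairCnt t old new := by
  intro new
  induction new with
  | nil => intro old pre h; simp [PySem.List.enumerate_nil, pairCnt]
  | cons n ns ih =>
      intro old pre h
      match old with
      | [] => simp at h
      | o :: os =>
        rw [PySem.List.enumerate_cons]
        have hget : PySem.List.pyGetD (pre ++ o :: os) ((pre.length : Int)) "" = o := by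
          simp [PySem.List.pyGetD_natCast, List.getD]
        have hshift : ((pre.length : Int)) + 1 = (((pre ++ [o]).length : Nat) : Int) := by
          simp
        have happ : pre ++ o :: os = (pre ++ [o]) ++ os := by simp
        have ihx := ih os (pre ++ [o]) (by simpa using h)
        rw [List.filter_cons]
        simp only [hget]
        by_cases hc : (o == t && (n == "empty")) = true
        · rw [if_pos hc]
          simp only [List.length_cons, hshift, happ, Nat.cast_add, Nat.cast_one]
          rw [ihx]
          simp [pairCnt, List.zip_cons_cons, wpred, hc]
        · rw [if_neg hc]
          simp only [hshift, happ]
          rw [ihx]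
          simp [pairCnt, List.zip_cons_cons, wpred, hc]

theorem innerA (old new : List String) (t : String) (h : new.length ≤ old.length) :
    countDeliversSum old new t = pairCnt t old new := by
  unfold countDeliversSum
  have hsum : ∀ (l : List (Int × String)), (l.map (fun _ => (1:Int))).sum = (l.length : Int) := by
    intro l; induction l with
    | nil => simp
    | cons x tl ih => simp; ring
  rw [hsum]
  have hcongr : (PySem.List.enumerate new).filter
      (fun p => (PySem.List.pyGetD old p.1 "" == t) && (PySem.List.pyGetD new p.1 "" == "empty"))
      = (PySem.List.enumerate new).filter
        (fun p => (PySem.List.pyGetD old p.1 "" == t) && (p.2 == "empty")) := by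
    apply List.filter_congr
    intro p hp
    rw [PySem.List.mem_enumerate_iff] at hp
    obtain ⟨k, hk, rfl⟩ := hp
    simp [PySem.List.pyGetD_natCast, List.getD, List.getElem?_eq_getElem hk]
  rw [hcongr]
  have := enumCount t new old [] h
  simpa using this

-- B's step increments the two accumulators by the two disjoint pair predicates
theorem cdStep_eq (wc : Int × Int) (p : String × String) :
    cdStep wc p = (wc.1 + (if wpred "warm" p then 1 else 0), wc.2 + (if wpred "cold" p then 1 else 0)) := by
  obtain ⟨o, n⟩ := p
  by_cases hn : n = "empty" <;> by_cases ho : o = "warm" <;> by_cases hc : o = "cold" <;>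
    simp_all [cdStep, wpred]

theorem cdFold (l : List (String × String)) : ∀ (w c : Int),
    l.foldl cdStep (w, c) = (w + ((l.countP (wpred "warm") : Nat) : Int), c + ((l.countP (wpred "cold") : Nat) : Int)) := by
  induction l with
  | nil => intro w c; simp
  | cons p tl ih =>
      intro w c
      rw [List.foldl_cons, cdStep_eq, ih]
      simp only [List.countP_cons, Prod.mk.injEq]
      constructor <;> · split_ifs <;> push_cast <;> ring

-- zip as a map over the index range (when the second list is not longer)
theorem zip_eq_rangeMap : ∀ (b a : List String), b.length ≤ a.length →
    a.zip b = (List.range b.length).map (fun j => (a.getD j "", b.getD j "")) := by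
  intro b
  induction b with
  | nil => intro a _; simp
  | cons y ys ih =>
      intro a h
      match a with
      | [] => simp at h
      | x :: xs =>
        rw [List.zip_cons_cons, List.length_cons, List.range_succ_eq_map, List.map_cons, List.map_map]
        simp only [List.getD_cons_zero, Function.comp_def, List.getD_cons_succ]
        rw [ih xs (by simpa using h)]

theorem iteSum (t : String) (a b : List String) (hba : b.length ≤ a.length) :
    ∀ w, b.length ≤ w →
    ((List.range w).map (fun j => (if (decide (j < b.length) && wpred t (a.getD j "", b.getD j "")) then (1:Int) else 0))).sum
      = pairCnt t a b := by
  intro w hw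
  rw [PySem.List.sum_map_ite_one_zero]
  have hsplit : w = b.length + (w - b.length) := by omega
  rw [hsplit, List.range_add, List.countP_append]
  have h2 : ((List.range (w - b.length)).map (fun j => b.length + j)).countP
      (fun j => decide (j < b.length) && wpred t (a.getD j "", b.getD j "")) = 0 := by
    rw [List.countP_eq_zero]
    intro j hj
    rw [List.mem_map] at hj
    obtain ⟨k, _, rfl⟩ := hj
    simp
  rw [h2, Nat.add_zero]
  have h1 : (List.range b.length).countP
      (fun j => decide (j < b.length) && wpred t (a.getD j "", b.getD j ""))
      = (List.range b.length).countP (fun j => wpred t (a.getD j "", b.getD j "")) := by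
    apply List.countP_congr
    intro j hj
    rw [List.mem_range] at hj
    simp [hj]
  rw [h1, pairCnt, zip_eq_rangeMap b a hba, List.countP_map]
  rfl

-- column structure
theorem cdCol_cons (s : List String) (l : List (List String)) (j : Nat) :
    cdCol (s :: l) j = if j < s.length then s.getD j "" :: cdCol l j else cdCol l j := by
  simp only [cdCol, List.filter_cons]
  split_ifs with h <;> simp_all

theorem cdCol_nil_of (l : List (List String)) (j : Nat) (h : ∀ s ∈ l, s.length ≤ j) :
    cdCol l j = [] := by
  simp only [cdCol, List.map_eq_nil_iff, List.filter_eq_nil_iff]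
  intro s hs
  simpa using Nat.not_lt.mpr (h s hs)

-- per-position step of the column count
theorem colCnt_cons_cons (t : String) (a b : List String) (l : List (List String)) (j : Nat)
    (hba : b.length ≤ a.length) (hl : ∀ s ∈ l, s.length ≤ b.length) :
    colCnt t (a :: b :: l) j
      = (if (decide (j < b.length) && wpred t (a.getD j "", b.getD j "")) then (1:Int) else 0)
        + colCnt t (b :: l) j := by
  by_cases hjb : j < b.length
  · have hja : j < a.length := lt_of_lt_of_le hjb hba
    rw [colCnt, colCnt, cdCol_cons a, if_pos hja, cdCol_cons b, if_pos hjb]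
    rw [List.drop_one, List.tail_cons, List.zip_cons_cons, List.countP_cons]
    simp only [List.drop_one, List.tail_cons]
    have hd : (decide (j < b.length) && wpred t (a.getD j "", b.getD j ""))
        = wpred t (a.getD j "", b.getD j "") := by simp [hjb]
    rw [hd]
    push_cast
    split_ifs <;> ring
  · have hlj : ∀ s ∈ b :: l, s.length ≤ j := by
      intro s hs
      rcases List.mem_cons.mp hs with rfl | hs
      · omega
      · exact le_trans (hl s hs) (by omega)
    have hnil : cdCol (b :: l) j = [] := cdCol_nil_of _ _ hlj
    have hbj : ¬ j < b.length := Nat.not_lt.mpr (hlj b (by simp))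
    have hg : (decide (j < b.length) && wpred t (a.getD j "", b.getD j "")) = false := by
      simp [hbj]
    rw [colCnt, colCnt, cdCol_cons a, hnil]
    simp only [hg, Bool.false_eq_true, if_false]
    split_ifs with hja <;> simp

-- sum over an index range of a pointwise sum
theorem sum_map_split (w : Nat) (f g : Nat → Int) :
    ((List.range w).map (fun j => f j + g j)).sum
      = ((List.range w).map f).sum + ((List.range w).map g).sum := by
  induction w with
  | zero => simp
  | succ n ih => simp [List.range_succ, ih]; ring

-- THE CRUX: with non-increasing snapshot lengths, summing B's per-column counts over any
-- sufficiently wide range equals summing A's per-transition pair counts.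
theorem colSumEq (t : String) : ∀ (snaps : List (List String)),
    List.Pairwise (fun x y => y.length ≤ x.length) snaps →
    ∀ w, (∀ s ∈ snaps, s.length ≤ w) →
    ((List.range w).map (fun j => colCnt t snaps j)).sum
      = ((snaps.zip (snaps.drop 1)).map (fun p => pairCnt t p.1 p.2)).sum := by
  intro snaps
  induction snaps with
  | nil => intro _ w _; simp [colCnt, cdCol]
  | cons a l ih =>
      intro hpw w hw
      match l with
      | [] =>
          simp only [List.drop_one, List.tail_cons, List.zip_nil_right, List.map_nil, List.sum_nil]
          have : ∀ j, colCnt t [a] j = 0 := by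
            intro j
            rw [colCnt, cdCol_cons]
            split_ifs <;> simp [cdCol]
          simp [this]
      | b :: l2 =>
          have hba : b.length ≤ a.length := (List.pairwise_cons.mp hpw).1 b (by simp)
          have hl2 : ∀ s ∈ l2, s.length ≤ b.length := by
            have := (List.pairwise_cons.mp (List.pairwise_cons.mp hpw).2).1
            exact this
          have hstep : ∀ j, colCnt t (a :: b :: l2) j
              = (if (decide (j < b.length) && wpred t (a.getD j "", b.getD j "")) then (1:Int) else 0)
                + colCnt t (b :: l2) j :=
            fun j => colCnt_cons_cons t a b l2 j hba hl2
          calc ((List.range w).map (fun j => colCnt t (a :: b :: l2) j)).sum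
              = ((List.range w).map (fun j =>
                  (if (decide (j < b.length) && wpred t (a.getD j "", b.getD j "")) then (1:Int) else 0)
                  + colCnt t (b :: l2) j)).sum := by
                  simp only [hstep]
            _ = pairCnt t a b + ((List.range w).map (fun j => colCnt t (b :: l2) j)).sum := by
                  rw [sum_map_split, iteSum t a b hba w (le_trans hba (hw a (by simp)))]
            _ = ((((a :: b :: l2)).zip ((a :: b :: l2).drop 1)).map (fun p => pairCnt t p.1 p.2)).sum := by
                  rw [ih (List.pairwise_cons.mp hpw).2 w (fun s hs => hw s (List.mem_cons_of_mem a hs))]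
                  simp only [List.drop_one, List.tail_cons, List.zip_cons_cons, List.map_cons,
                    List.sum_cons]

-- adjacent pairs of a range-indexed list
theorem zipAdj {α : Type} (m : Nat) (g : Nat → α) :
    ((List.range m).map g).zip (((List.range m).map g).drop 1)
      = (List.range (m - 1)).map (fun k => (g k, g (k+1))) := by
  match m with
  | 0 => simp
  | Nat.succ s =>
      have hdrop : (((List.range (s+1)).map g).drop 1) = (List.range s).map (fun k => g (k+1)) := by
        rw [List.range_succ_eq_map]
        simp [List.map_map, Function.comp_def]
      rw [hdrop, List.range_succ, List.map_append]
      rw [← List.append_nil ((List.range s).map (fun k => g (k+1))), List.zip_append (by simp)]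
      simp only [List.zip_nil_right, List.append_nil]
      rw [List.zip_map', Nat.succ_sub_one]

-- the even-index counter snapshot at transition k (proof-side abbreviation)
def gSnap (traj : List (List String × List String)) (k : Nat) : List String :=
  (traj.getD (2*k) ([], [])).2

-- ===== VERDICT (by name: the statement is the Claim_ definition above) =====
theorem count_delivers_spec : Claim_equal_count_delivers := by
  intro traj _ hpre
  unfold Spec_count_delivers
  rcases Nat.eq_zero_or_pos traj.length with h0 | hpos
  · rw [List.length_eq_zero_iff] at h0
    subst h0
    decide
  · have hm1 : (traj.length + 1)/2 - 1 + 1 = (traj.length + 1)/2 := by omega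
    -- A as a fold over transitions of the two pair counts
    have hA : count_delivers traj
        = (List.range ((traj.length + 1)/2 - 1)).foldl
            (fun wc k => (wc.1 + pairCnt "warm" (traj.getD (2*k) ([],[])).2 (traj.getD (2*k+2) ([],[])).2,
                          wc.2 + pairCnt "cold" (traj.getD (2*k) ([],[])).2 (traj.getD (2*k+2) ([],[])).2))
            ((0:Int), (0:Int)) := by
      unfold count_delivers
      rw [PySem.List.pyRange_of_pos 0 (traj.length : Int) (by norm_num : (0:Int) < 2)]
      have hM : (if (0:Int) < (traj.length : Int) then (((traj.length : Int) - 0 + 2 - 1)/2).toNat else 0)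
          = (traj.length + 1)/2 := by split <;> omega
      rw [hM, List.foldl_map, ← hm1, List.range_succ_eq_map, List.foldl_cons,
        if_neg (by norm_num), List.foldl_map]
      apply PySem.List.foldl_congr_mem
      intro acc k hk
      rw [List.mem_range] at hk
      have hgate : (2:Int) ≤ 0 + 2 * ((Nat.succ k : Nat) : Int) := by push_cast; omega
      rw [if_pos hgate]
      have hi1 : (0:Int) + 2 * ((Nat.succ k : Nat) : Int) - 2 = ((2*k : Nat) : Int) := by
        push_cast [Nat.succ_eq_add_one]; ring
      have hi2 : (0:Int) + 2 * ((Nat.succ k : Nat) : Int) = ((2*k + 2 : Nat) : Int) := by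
        push_cast [Nat.succ_eq_add_one]; ring
      rw [hi1, hi2, PySem.List.pyGetD_natCast, PySem.List.pyGetD_natCast]
      have hlen : ((traj.getD (2*k+2) ([],[])).2).length ≤ ((traj.getD (2*k) ([],[])).2).length :=
        hpre k (by omega) (by omega)
      simp only [innerA _ _ _ hlen]
    -- lengths of the even snapshots are non-increasing (from Pre_)
    have hmono : ∀ d i, i + d < (traj.length + 1)/2 →
        (gSnap traj (i + d)).length ≤ (gSnap traj i).length := by
      intro d
      induction d with
      | zero => intro i _; exact le_refl _
      | succ n ihd =>
          intro i h
          have hstep : (gSnap traj (i + n + 1)).length ≤ (gSnap traj (i + n)).length := by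
            have h2 : 2 * (i + n) + 2 < traj.length := by omega
            have := hpre (i + n) (by omega) h2
            simpa [gSnap, show 2 * (i + n + 1) = 2 * (i + n) + 2 by ring] using this
          exact le_trans (by simpa [show i + (n+1) = i + n + 1 by ring] using hstep)
            (ihd i (by omega))
    have hpwS : List.Pairwise (fun x y => y.length ≤ x.length)
        ((List.range ((traj.length + 1)/2)).map (gSnap traj)) := by
      rw [List.pairwise_iff_getElem]
      intro i j hi hj hij
      simp only [List.length_map, List.length_range] at hi hj
      simp only [List.getElem_map, List.getElem_range]
      have h := hmono (j - i) i (by omega)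
      rwa [show i + (j - i) = j by omega] at h
    have hwS : ∀ s ∈ (List.range ((traj.length + 1)/2)).map (gSnap traj),
        s.length ≤ ((((List.range ((traj.length + 1)/2)).map (gSnap traj)).map List.length).foldl max 0) := by
      intro s hs
      exact (PySem.List.le_foldl_max _ 0).2 s.length (List.mem_map_of_mem hs)
    -- B's snapshot list is the even-index snapshots
    have hsnaps : ((PySem.List.slice? traj none none 2).getD []).map (fun p => p.2)
        = (List.range ((traj.length + 1)/2)).map (gSnap traj) := by
      rw [sliceEvenNone traj (([],[]) : List String × List String)]
      simp [List.map_map, Function.comp_def, gSnap]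
    -- B as the two column-count sums
    have hB : count_delivers_alt traj
        = ((0:Int) + ((List.range ((((List.range ((traj.length + 1)/2)).map (gSnap traj)).map List.length).foldl max 0)).map
              (fun j => colCnt "warm" ((List.range ((traj.length + 1)/2)).map (gSnap traj)) j)).sum,
           (0:Int) + ((List.range ((((List.range ((traj.length + 1)/2)).map (gSnap traj)).map List.length).foldl max 0)).map
              (fun j => colCnt "cold" ((List.range ((traj.length + 1)/2)).map (gSnap traj)) j)).sum) := by
      simp only [count_delivers_alt]
      rw [hsnaps]
      refine Eq.trans (PySem.List.foldl_congr_mem _ _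
        (fun (wc : Int × Int) j =>
          (wc.1 + colCnt "warm" ((List.range ((traj.length + 1)/2)).map (gSnap traj)) j,
           wc.2 + colCnt "cold" ((List.range ((traj.length + 1)/2)).map (gSnap traj)) j)) _ ?_) ?_
      · intro acc j _
        obtain ⟨w, c⟩ := acc
        simp only [colCnt, cdCol]
        rw [cdFold]
      · rw [PySem.List.foldl_prod_mk
          (f := fun acc j => acc + colCnt "warm" ((List.range ((traj.length + 1)/2)).map (gSnap traj)) j)
          (g := fun acc j => acc + colCnt "cold" ((List.range ((traj.length + 1)/2)).map (gSnap traj)) j),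
          PySem.List.foldl_add, PySem.List.foldl_add]
    have hmapA : ∀ tname : String,
        ((List.range ((traj.length + 1)/2 - 1)).map (fun k => pairCnt tname (gSnap traj k) (gSnap traj (k+1))))
          = ((List.range ((traj.length + 1)/2 - 1)).map
              (fun k => pairCnt tname (traj.getD (2*k) ([],[])).2 (traj.getD (2*k+2) ([],[])).2)) := by
      intro tname
      apply List.map_congr_left
      intro k _
      simp [gSnap, show 2 * (k+1) = 2*k + 2 by ring]
    rw [hA,
      PySem.List.foldl_prod_mk
        (f := fun acc k => acc + pairCnt "warm" (traj.getD (2*k) ([],[])).2 (traj.getD (2*k+2) ([],[])).2)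
        (g := fun acc k => acc + pairCnt "cold" (traj.getD (2*k) ([],[])).2 (traj.getD (2*k+2) ([],[])).2),
      PySem.List.foldl_add, PySem.List.foldl_add, hB,
      colSumEq "warm" _ hpwS _ hwS, colSumEq "cold" _ hpwS _ hwS,
      zipAdj ((traj.length + 1)/2) (gSnap traj), List.map_map, List.map_map]
    simp only [Function.comp_def]
    rw [hmapA "warm", hmapA "cold"]
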